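-- pv_equiv track=rewrite | github.com/benjisidi/asteroid-project | fitting.py | make_sigmas
-- ===== SOURCE A (Python) =====
-- def make_sigmas(length, sigma, sigma_extreme, outlier_indicies):
--     output = []
--     for i in range(length):
--         if i in outlier_indicies:
--             output.append(sigma_extreme)
--         else:
--             output.append(sigma)
--     return output
-- ===== SOURCE B (Python) =====
-- def make_sigmas(length, sigma, sigma_extreme, outlier_indicies):
--     output = [sigma] * length
--     for idx in outlier_indicies:
--         if 0 <= idx < length:
--             output[idx] = sigma_extreme
--     return output
-- ===== Notes on version B (the rewrite author's own statement) =====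
-- stated objective: faster
-- what changed: Instead of scanning range(length) and testing membership of each index in outlier_indicies, B bulk-fills [sigma]*length and patches only the in-range outlier indices in place.
import Mathlib
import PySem

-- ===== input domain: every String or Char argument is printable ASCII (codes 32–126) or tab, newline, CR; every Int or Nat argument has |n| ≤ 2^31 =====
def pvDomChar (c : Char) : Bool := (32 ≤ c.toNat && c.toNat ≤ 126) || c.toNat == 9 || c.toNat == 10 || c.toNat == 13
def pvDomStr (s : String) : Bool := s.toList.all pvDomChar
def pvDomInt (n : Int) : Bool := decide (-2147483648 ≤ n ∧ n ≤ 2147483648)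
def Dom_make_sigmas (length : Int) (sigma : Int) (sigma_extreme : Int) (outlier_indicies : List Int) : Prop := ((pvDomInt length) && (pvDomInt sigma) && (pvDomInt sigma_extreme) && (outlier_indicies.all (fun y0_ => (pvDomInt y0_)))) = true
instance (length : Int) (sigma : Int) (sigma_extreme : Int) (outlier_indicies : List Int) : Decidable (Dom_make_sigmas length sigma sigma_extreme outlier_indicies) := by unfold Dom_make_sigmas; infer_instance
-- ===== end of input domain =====

-- B replaces A's per-index membership scan with a bulk fill of sigma plus a sparse patch at
-- the in-range outlier indices (faster: O(length+k) vs O(length*k)).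


-- ===== PORT A =====
def make_sigmas (length : Int) (sigma : Int) (sigma_extreme : Int) (outlier_indicies : List Int) : List Int :=
  (PySem.List.pyRange 0 length 1).foldl
    (fun output i =>
      if i ∈ outlier_indicies then output ++ [sigma_extreme] else output ++ [sigma])
    []

-- ===== PORT B =====
def make_sigmas_alt (length : Int) (sigma : Int) (sigma_extreme : Int) (outlier_indicies : List Int) : List Int :=
  outlier_indicies.foldl
    (fun output idx =>
      if 0 ≤ idx ∧ idx < length then PySem.List.pySetD output idx sigma_extreme else output)
    (List.replicate length.toNat sigma)

-- ===== PRECONDITION & SPEC =====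
def Spec_make_sigmas (length : Int) (sigma : Int) (sigma_extreme : Int) (outlier_indicies : List Int) (out : List Int) : Prop := out = make_sigmas_alt length sigma sigma_extreme outlier_indicies
instance (length : Int) (sigma : Int) (sigma_extreme : Int) (outlier_indicies : List Int) (out : List Int) : Decidable (Spec_make_sigmas length sigma sigma_extreme outlier_indicies out) := by unfold Spec_make_sigmas; infer_instance

-- ===== CLAIM (what is proved, stated in full; the proofs are below) =====
def Claim_equal_make_sigmas : Prop := ∀ (length : Int) (sigma : Int) (sigma_extreme : Int) (outlier_indicies : List Int), Dom_make_sigmas length sigma sigma_extreme outlier_indicies → Spec_make_sigmas length sigma sigma_extreme outlier_indicies (make_sigmas length sigma sigma_extreme outlier_indicies)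

-- ===== LEMMAS AND PROOFS =====

-- A equals the pointwise map over the range.
theorem makeA_eq_map (L s e : Int) (os : List Int) :
    make_sigmas L s e os
      = (PySem.List.pyRange 0 L 1).map (fun i => if i ∈ os then e else s) := by
  unfold make_sigmas
  have hstep : (fun (output : List Int) (i : Int) =>
      if i ∈ os then output ++ [e] else output ++ [s])
      = (fun (output : List Int) (i : Int) => output ++ [if i ∈ os then e else s]) := by
    funext output i; split <;> rfl
  rw [hstep, PySem.List.foldl_append_singleton_eq_map]
  simp

-- B's fold preserves the length of the accumulator.
theorem bfold_length (L e : Int) (os acc : List Int) :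
    (os.foldl (fun output idx =>
      if 0 ≤ idx ∧ idx < L then PySem.List.pySetD output idx e else output) acc).length
      = acc.length := by
  induction os generalizing acc with
  | nil => rfl
  | cons idx os ih =>
    simp only [List.foldl_cons]
    split
    · rename_i h
      rw [ih, PySem.List.pySetD_of_nonneg _ _ h.1, List.length_set]
    · exact ih acc

-- B's fold at an in-range position: sigma_extreme exactly when the index occurs in os.
theorem bfold_get (L e : Int) (os : List Int) : ∀ (acc : List Int),
    acc.length = L.toNat → ∀ j (hj : j < acc.length),
    (os.foldl (fun output idx =>
      if 0 ≤ idx ∧ idx < L then PySem.List.pySetD output idx e else output) acc)[j]'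
      (by rw [bfold_length]; exact hj)
      = if ((j : Int) ∈ os) then e else acc[j] := by
  induction os with
  | nil => intro acc _ j hj; simp
  | cons idx os ih =>
    intro acc hacc j hj
    have hjL : (j : Int) < L := by
      have h0 : j < L.toNat := hacc ▸ hj
      omega
    simp only [List.foldl_cons]
    by_cases h : 0 ≤ idx ∧ idx < L
    · simp only [if_pos h]
      have hset : PySem.List.pySetD acc idx e = acc.set idx.toNat e :=
        PySem.List.pySetD_of_nonneg _ _ h.1
      have hlen' : (acc.set idx.toNat e).length = L.toNat := by
        rw [List.length_set]; exact hacc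
      have := ih (acc.set idx.toNat e) hlen' j (by rw [List.length_set]; exact hj)
      simp only [hset] at *
      rw [this]
      by_cases hm : (j : Int) ∈ os
      · simp [hm]
      · by_cases hij : idx.toNat = j
        · have : (j : Int) = idx := by omega
          simp [this, hij]
        · have : (j : Int) ≠ idx := by omega
          simp [hm, this, hij]
    · simp only [if_neg h]
      have hne : (j : Int) ≠ idx := by
        intro hcontra
        exact h ⟨by omega, by omega⟩
      rw [ih acc hacc j hj]
      simp [hne]

-- ===== VERDICT (by name: the statement is the Claim_ definition above) =====
theorem make_sigmas_spec : Claim_equal_make_sigmas := by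
  intro L s e os _
  unfold Spec_make_sigmas
  rw [makeA_eq_map]
  unfold make_sigmas_alt
  apply List.ext_getElem
  · rw [bfold_length, List.length_map, PySem.List.length_pyRange_one, List.length_replicate]
    omega
  · intro j hj hj'
    have hjrep : j < (List.replicate L.toNat s).length := by
      rw [bfold_length] at hj'; exact hj'
    rw [bfold_get L e os (List.replicate L.toNat s) (by simp) j hjrep]
    have hjn : j < (L - 0).toNat := by
      simpa [PySem.List.length_pyRange_one] using hj
    rw [List.getElem_map, PySem.List.getElem_pyRange_one]
    simp
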